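-- pv_equiv track=rewrite | github.com/BarnabyShearer/aoc | aoc20211219a.py | find
-- ===== SOURCE A (Python) =====
-- import operator
--
-- def rot_x(cords):
--     return tuple((x, z, -y) for x, y, z in cords)
--
-- def rot_y(cords):
--     return tuple((z, y, -x) for x, y, z in cords)
--
-- def rot_z(cords):
--     return tuple((y, -x, z) for x, y, z in cords)
--
-- def rep(f, n, arg):
--     for _ in range(n):
--         arg = f(arg)
--     return arg
--
-- def rots(cords):
--     for rx in range(2):
--         for ry in range(4) if not rx else (0, 2):
--             for rz in range(4):
--                 yield rep(rot_x, rx, rep(rot_y, ry, rep(rot_z, rz, cords)))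
--
-- def sub(a, b):
--     return tuple(map(operator.sub, a, b))
--
-- def add(a, b):
--     return tuple(map(operator.add, a, b))
--
-- def find(beacons, s):
--     for r in rots(s):
--         for b in beacons:
--             for bb in r[:-12]:
--                 off = sub(b, bb)
--                 match = 0
--                 for bbb in r:
--                     if add(bbb, off) in beacons:
--                         match += 1
--                         if match == 12:
--                             break
--                 else:
--                     continue
--                 return off, tuple(add(bbb, off) for bbb in r)
--     return None, None
-- ===== SOURCE B (Python) =====
-- import operator
-- from collections import Counter
--
-- def rot_x(cords):
--     return tuple((x, z, -y) for x, y, z in cords)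
--
-- def rot_y(cords):
--     return tuple((z, y, -x) for x, y, z in cords)
--
-- def rot_z(cords):
--     return tuple((y, -x, z) for x, y, z in cords)
--
-- def rep(f, n, arg):
--     for _ in range(n):
--         arg = f(arg)
--     return arg
--
-- def rots(cords):
--     for rx in range(2):
--         for ry in range(4) if not rx else (0, 2):
--             for rz in range(4):
--                 yield rep(rot_x, rx, rep(rot_y, ry, rep(rot_z, rz, cords)))
--
-- def sub(a, b):
--     return tuple(map(operator.sub, a, b))
--
-- def add(a, b):
--     return tuple(map(operator.add, a, b))
--
-- def find(beacons, s):
--     bset = set(beacons)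
--     for r in rots(s):
--         # counts[off] = how many rotated points land on a (distinct) beacon when shifted by off
--         counts = Counter(sub(b, bbb) for b in bset for bbb in r)
--         for b in beacons:
--             for bb in r[:-12]:
--                 off = sub(b, bb)
--                 if counts[off] >= 12:
--                     return off, tuple(add(bbb, off) for bbb in r)
--     return None, None
-- ===== Notes on version B (the rewrite author's own statement) =====
-- stated objective: faster
-- what changed: Per rotation, B precomputes one Counter of beacon-minus-point differences over the deduplicated beacon set, so each candidate offset is checked by a single counter lookup instead of A's rescan of the whole rotated list with a list-membership test per point.
import Mathlib
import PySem

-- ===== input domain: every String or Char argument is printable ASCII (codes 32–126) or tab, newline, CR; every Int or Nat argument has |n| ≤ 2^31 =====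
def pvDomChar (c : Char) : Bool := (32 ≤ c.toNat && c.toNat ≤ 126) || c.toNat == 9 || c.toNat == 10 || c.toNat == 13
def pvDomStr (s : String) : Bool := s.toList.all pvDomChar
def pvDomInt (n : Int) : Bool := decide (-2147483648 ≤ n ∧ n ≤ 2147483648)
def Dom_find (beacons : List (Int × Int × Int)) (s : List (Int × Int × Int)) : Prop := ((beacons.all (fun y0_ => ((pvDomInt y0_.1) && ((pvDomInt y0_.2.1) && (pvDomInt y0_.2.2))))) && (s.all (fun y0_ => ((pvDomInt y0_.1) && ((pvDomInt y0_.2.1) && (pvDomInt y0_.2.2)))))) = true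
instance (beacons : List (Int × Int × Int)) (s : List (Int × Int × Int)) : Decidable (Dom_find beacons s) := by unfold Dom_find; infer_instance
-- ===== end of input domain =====

-- B replaces A's per-offset rescan of the rotated list by a per-rotation Counter of
-- beacon-minus-point differences, so each candidate offset costs one lookup (objective: faster).

-- ===== PORT A =====
-- shared module helpers (rot_x/rot_y/rot_z/rep/rots/sub/add)
def pvSub (a b : Int × Int × Int) : Int × Int × Int := (a.1 - b.1, a.2.1 - b.2.1, a.2.2 - b.2.2)

def pvAdd (a b : Int × Int × Int) : Int × Int × Int := (a.1 + b.1, a.2.1 + b.2.1, a.2.2 + b.2.2)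

def pvRotX (cords : List (Int × Int × Int)) : List (Int × Int × Int) :=
  cords.map (fun c => (c.1, c.2.2, -c.2.1))

def pvRotY (cords : List (Int × Int × Int)) : List (Int × Int × Int) :=
  cords.map (fun c => (c.2.2, c.2.1, -c.1))

def pvRotZ (cords : List (Int × Int × Int)) : List (Int × Int × Int) :=
  cords.map (fun c => (c.2.1, -c.1, c.2.2))

-- rep(f, n, arg): for _ in range(n): arg = f(arg)
def pvRep (f : List (Int × Int × Int) → List (Int × Int × Int)) (n : Nat)
    (arg : List (Int × Int × Int)) : List (Int × Int × Int) :=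
  (List.range n).foldl (fun a _ => f a) arg

-- rots(cords), the generator materialised in yield order
def pvRots (cords : List (Int × Int × Int)) : List (List (Int × Int × Int)) :=
  (List.range 2).flatMap (fun rx =>
    (if rx = 0 then [0, 1, 2, 3] else [0, 2]).flatMap (fun ry =>
      (List.range 4).map (fun rz => pvRep pvRotX rx (pvRep pvRotY ry (pvRep pvRotZ rz cords)))))

-- A's innermost 'for bbb in r: … match += 1; if match == 12: break / else: continue':
-- true exactly when the break fires (match reached 12)
def pvMatchLoop (beacons : List (Int × Int × Int)) (off : Int × Int × Int) :
    List (Int × Int × Int) → Nat → Bool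
  | [], _ => false
  | bbb :: rest, m =>
    if pvAdd bbb off ∈ beacons then
      if m + 1 = 12 then true else pvMatchLoop beacons off rest (m + 1)
    else pvMatchLoop beacons off rest m

-- 'for bb in r[:-12]: …; return off, tuple(add(bbb, off) for bbb in r)'
def pvLoopBB (beacons : List (Int × Int × Int)) (r : List (Int × Int × Int))
    (b : Int × Int × Int) :
    List (Int × Int × Int) → Option ((Int × Int × Int) × List (Int × Int × Int))
  | [] => none
  | bb :: rest =>
    let off := pvSub b bb
    if pvMatchLoop beacons off r 0 then some (off, r.map (fun bbb => pvAdd bbb off))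
    else pvLoopBB beacons r b rest

-- 'for b in beacons: …'
def pvLoopB (beacons : List (Int × Int × Int)) (r : List (Int × Int × Int)) :
    List (Int × Int × Int) → Option ((Int × Int × Int) × List (Int × Int × Int))
  | [] => none
  | b :: rest =>
    match pvLoopBB beacons r b (PySem.List.slice r none (some (-12))) with
    | some res => some res
    | none => pvLoopB beacons r rest

-- 'for r in rots(s): …'
def pvLoopR (beacons : List (Int × Int × Int)) :
    List (List (Int × Int × Int)) → Option ((Int × Int × Int) × List (Int × Int × Int))
  | [] => none
  | r :: rest =>
    match pvLoopB beacons r beacons with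
    | some res => some res
    | none => pvLoopR beacons rest

def find (beacons : List (Int × Int × Int)) (s : List (Int × Int × Int)) :
    (Option (Int × Int × Int)) × (Option (List (Int × Int × Int))) :=
  match pvLoopR beacons (pvRots s) with
  | some (off, pts) => (some off, some pts)
  | none => (none, none)

-- ===== PORT B =====
-- Counter(sub(b, bbb) for b in bset for bbb in r)
def pvCounts (bset : PySem.Set (Int × Int × Int)) (r : List (Int × Int × Int)) :
    PySem.Dict (Int × Int × Int) Int :=
  PySem.Dict.counter (bset.flatMap (fun b => r.map (fun bbb => pvSub b bbb)))

def find_alt (beacons : List (Int × Int × Int)) (s : List (Int × Int × Int)) :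
    (Option (Int × Int × Int)) × (Option (List (Int × Int × Int))) :=
  let bset := PySem.Set.ofList beacons
  match (pvRots s).findSome? (fun r =>
    let counts := pvCounts bset r
    beacons.findSome? (fun b =>
      (PySem.List.slice r none (some (-12))).findSome? (fun bb =>
        let off := pvSub b bb
        if 12 ≤ counts.getD off 0 then some (off, r.map (fun bbb => pvAdd bbb off))
        else none))) with
  | some (off, pts) => (some off, some pts)
  | none => (none, none)

-- ===== PRECONDITION & SPEC =====
def Spec_find (beacons : List (Int × Int × Int)) (s : List (Int × Int × Int)) (out : (Option (Int × Int × Int)) × (Option (List (Int × Int × Int)))) : Prop := out = find_alt beacons s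
instance (beacons : List (Int × Int × Int)) (s : List (Int × Int × Int)) (out : (Option (Int × Int × Int)) × (Option (List (Int × Int × Int)))) : Decidable (Spec_find beacons s out) := by unfold Spec_find; infer_instance

-- ===== CLAIM (what is proved, stated in full; the proofs are below) =====
def Claim_equal_find : Prop := ∀ (beacons : List (Int × Int × Int)) (s : List (Int × Int × Int)), Dom_find beacons s → Spec_find beacons s (find beacons s)

-- ===== LEMMAS AND PROOFS =====

theorem pv_sum_map_add {α : Type} (l : List α) (f g : α → Nat) :
    (l.map (fun x => f x + g x)).sum = (l.map f).sum + (l.map g).sum := by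
  induction l with
  | nil => simp
  | cons a t ih => simp [ih]; omega

theorem pv_countP_eq_sum_ite {α : Type} (l : List α) (p : α → Bool) :
    l.countP p = (l.map (fun x => if p x then 1 else 0)).sum := by
  induction l with
  | nil => simp
  | cons a t ih => by_cases h : p a <;> simp [h, ih, Nat.add_comm]

-- double-count swap: summing match counts over beacons = summing beacon counts over points
theorem pv_sum_swap {α β : Type} (bs : List α) (r : List β) (p : α → β → Bool) :
    (bs.map (fun b => r.countP (p b))).sum = (r.map (fun x => bs.countP (fun b => p b x))).sum := by
  induction bs with
  | nil => simp
  | cons a t ih =>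
    simp only [List.map_cons, List.sum_cons, ih, List.countP_cons]
    rw [pv_sum_map_add, pv_countP_eq_sum_ite]
    omega

theorem pv_countP_flatMap {α β : Type} (l : List α) (f : α → List β) (p : β → Bool) :
    (l.flatMap f).countP p = (l.map (fun b => (f b).countP p)).sum := by
  induction l with
  | nil => simp
  | cons a t ih => simp [List.countP_append, ih]

-- the Counter lookup is the number of points of r that land on a beacon after shifting by off
theorem pv_counts_getD (beacons : List (Int × Int × Int)) (r : List (Int × Int × Int))
    (off : Int × Int × Int) :
    (pvCounts (PySem.Set.ofList beacons) r).getD off 0 =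
      (r.countP (fun bbb => decide (pvAdd bbb off ∈ beacons)) : Int) := by
  unfold pvCounts
  rw [PySem.Dict.getD_counter]
  have h1 : ((PySem.Set.ofList beacons).flatMap (fun b => r.map (fun bbb => pvSub b bbb))).count off
      = r.countP (fun bbb => decide (pvAdd bbb off ∈ beacons)) := by
    rw [List.count, pv_countP_flatMap]
    have h2 : ∀ b : Int × Int × Int,
        ((r.map (fun bbb => pvSub b bbb)).countP (· == off)) =
          r.countP (fun bbb => pvSub b bbb == off) := by
      intro b; rw [List.countP_map]; rfl
    simp only [h2]
    rw [pv_sum_swap (PySem.Set.ofList beacons) r (fun b bbb => pvSub b bbb == off),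
      pv_countP_eq_sum_ite r]
    congr 1
    apply List.map_congr_left
    intro bbb _
    have heq : ∀ b : Int × Int × Int, (pvSub b bbb == off) = (b == pvAdd bbb off) := by
      intro b
      rw [Bool.eq_iff_iff]
      simp only [beq_iff_eq, pvSub, pvAdd, Prod.ext_iff]
      omega
    simp only [heq]
    by_cases hm : pvAdd bbb off ∈ beacons
    · have : (PySem.Set.ofList beacons).countP (· == pvAdd bbb off) =
          (PySem.Set.ofList beacons).count (pvAdd bbb off) := rfl
      rw [this, List.count_eq_one_of_mem (PySem.Set.nodup_ofList beacons)
        ((PySem.Set.mem_ofList beacons (pvAdd bbb off)).2 hm)]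
      simp [hm]
    · have : (PySem.Set.ofList beacons).countP (· == pvAdd bbb off) =
          (PySem.Set.ofList beacons).count (pvAdd bbb off) := rfl
      rw [this, List.count_eq_zero_of_not_mem (fun hc => hm ((PySem.Set.mem_ofList beacons (pvAdd bbb off)).1 hc))]
      simp [hm]
  rw [h1]

-- A's early-breaking match loop decides '12 ≤ m + number of shifted points lying in beacons'
theorem pv_matchLoop_eq (beacons : List (Int × Int × Int)) (off : Int × Int × Int)
    (r : List (Int × Int × Int)) : ∀ m : Nat, m < 12 →
    pvMatchLoop beacons off r m =
      decide (12 ≤ m + r.countP (fun bbb => decide (pvAdd bbb off ∈ beacons))) := by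
  induction r with
  | nil => intro m hm; simp [pvMatchLoop]; omega
  | cons bbb rest ih =>
    intro m hm
    by_cases h : pvAdd bbb off ∈ beacons
    · by_cases h12 : m + 1 = 12
      · have hc : 1 ≤ (bbb :: rest).countP (fun x => decide (pvAdd x off ∈ beacons)) := by
          simp [h]
        simp only [pvMatchLoop, if_pos h, if_pos h12]
        have : 12 ≤ m + (bbb :: rest).countP (fun x => decide (pvAdd x off ∈ beacons)) := by
          omega
        simp [this]
      · have hd : decide (pvAdd bbb off ∈ beacons) = true := by simp [h]
        simp only [pvMatchLoop, if_pos h, if_neg h12, ih (m + 1) (by omega),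
          List.countP_cons, hd, if_true]
        rw [decide_eq_decide]
        omega
    · have hd : decide (pvAdd bbb off ∈ beacons) = false := by simp [h]
      simp only [pvMatchLoop, if_neg h, ih m hm, List.countP_cons, hd]
      norm_num

-- per-candidate agreement of the two tests
theorem pv_test_eq (beacons : List (Int × Int × Int)) (r : List (Int × Int × Int))
    (off : Int × Int × Int) :
    pvMatchLoop beacons off r 0 =
      decide (12 ≤ (pvCounts (PySem.Set.ofList beacons) r).getD off 0) := by
  rw [pv_matchLoop_eq beacons off r 0 (by omega), pv_counts_getD]
  simp only [Nat.zero_add, decide_eq_decide]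
  omega

theorem pv_loopBB_eq (beacons r : List (Int × Int × Int)) (b : Int × Int × Int)
    (cands : List (Int × Int × Int)) :
    pvLoopBB beacons r b cands = cands.findSome? (fun bb =>
      let off := pvSub b bb
      if 12 ≤ (pvCounts (PySem.Set.ofList beacons) r).getD off 0 then
        some (off, r.map (fun bbb => pvAdd bbb off))
      else none) := by
  induction cands with
  | nil => rfl
  | cons bb rest ih =>
    simp only [pvLoopBB, List.findSome?_cons, pv_test_eq]
    by_cases h : 12 ≤ (pvCounts (PySem.Set.ofList beacons) r).getD (pvSub b bb) 0
    · simp [h]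
    · simp [h, ih]

theorem pv_loopB_eq (beacons r : List (Int × Int × Int)) (bs : List (Int × Int × Int)) :
    pvLoopB beacons r bs = bs.findSome? (fun b =>
      (PySem.List.slice r none (some (-12))).findSome? (fun bb =>
        let off := pvSub b bb
        if 12 ≤ (pvCounts (PySem.Set.ofList beacons) r).getD off 0 then
          some (off, r.map (fun bbb => pvAdd bbb off))
        else none)) := by
  induction bs with
  | nil => rfl
  | cons b rest ih =>
    simp only [pvLoopB, List.findSome?_cons, pv_loopBB_eq]
    cases h : (PySem.List.slice r none (some (-12))).findSome? (fun bb =>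
      let off := pvSub b bb
      if 12 ≤ (pvCounts (PySem.Set.ofList beacons) r).getD off 0 then
        some (off, r.map (fun bbb => pvAdd bbb off))
      else none) with
    | none => simp [ih]
    | some res => simp

theorem pv_loopR_eq (beacons : List (Int × Int × Int)) (rl : List (List (Int × Int × Int))) :
    pvLoopR beacons rl = rl.findSome? (fun r =>
      let counts := pvCounts (PySem.Set.ofList beacons) r
      beacons.findSome? (fun b =>
        (PySem.List.slice r none (some (-12))).findSome? (fun bb =>
          let off := pvSub b bb
          if 12 ≤ counts.getD off 0 then some (off, r.map (fun bbb => pvAdd bbb off))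
          else none))) := by
  induction rl with
  | nil => rfl
  | cons r rest ih =>
    simp only [pvLoopR, List.findSome?_cons, pv_loopB_eq]
    cases h : beacons.findSome? (fun b =>
      (PySem.List.slice r none (some (-12))).findSome? (fun bb =>
        let off := pvSub b bb
        if 12 ≤ (pvCounts (PySem.Set.ofList beacons) r).getD off 0 then
          some (off, r.map (fun bbb => pvAdd bbb off))
        else none)) with
    | none => simp [ih]
    | some res => simp

-- ===== VERDICT (by name: the statement is the Claim_ definition above) =====
theorem find_spec : Claim_equal_find := by
  intro beacons s _
  unfold Spec_find find find_alt
  rw [pv_loopR_eq]
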